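-- pv_equiv track=rewrite | github.com/Water-Stone/Baekjoon | 프로그래머스/lv1/118666. 성격 유형 검사하기/성격 유형 검사하기.py | solution
-- ===== SOURCE A (Python) =====
-- from collections import OrderedDict
--
-- def solution(survey, choices):
--     # RT, CF, JM, AN
--     indicate = OrderedDict()
--     indicate = {'RT': [0, 0], 'CF': [0, 0], 'JM': [0, 0], 'AN': [0, 0]}
--
--     for i in range(len(choices)):
--         point = choices[i]
--         is_reversed = False
--         curr_indi = ''.join(sorted(survey[i]))
--         if curr_indi != survey[i]:
--             is_reversed = True
--         if point < 4:
--             if point == 1: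
--                 point = 3
--             elif point == 3:
--                 point = 1
--
--             if is_reversed:
--                 indicate.get(curr_indi)[1] += point
--             else:
--                 indicate.get(curr_indi)[0] += point
--         elif point > 4:
--             point -= 4
--             if is_reversed:
--                 indicate.get(curr_indi)[0] += point
--             else:
--                 indicate.get(curr_indi)[1] += point
--
--     answer = ''
--     for indi, value in indicate.items():
--         answer += indi[value.index(max(value))]
--     return answer
-- ===== SOURCE B (Python) =====
-- def _pull(q, c):
--     # signed pull of one answer toward the first letter of its sorted indicator key
--     if c < 4:
--         w = {1: 3, 3: 1}.get(c, c)
--     elif c > 4: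
--         w = 4 - c
--     else:
--         w = 0
--     return w if q == ''.join(sorted(q)) else -w
--
-- def solution(survey, choices):
--     answer = ''
--     for key in ('RT', 'CF', 'JM', 'AN'):
--         balance = sum(_pull(q, c) for q, c in zip(survey, choices)
--                       if ''.join(sorted(q)) == key)
--         answer += key[0] if balance >= 0 else key[1]
--     return answer
-- ===== Notes on version B (the rewrite author's own statement) =====
-- stated objective: alternative
-- what changed: B drops A's single pass that mutates a dict of per-pole [left,right] score lists (with is_reversed branch split and index(max) selection) and instead makes four staged passes, one per indicator in output order, each summing a signed per-answer pull over the matching answers and choosing the letter by the sign of that sum.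
import Mathlib
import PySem

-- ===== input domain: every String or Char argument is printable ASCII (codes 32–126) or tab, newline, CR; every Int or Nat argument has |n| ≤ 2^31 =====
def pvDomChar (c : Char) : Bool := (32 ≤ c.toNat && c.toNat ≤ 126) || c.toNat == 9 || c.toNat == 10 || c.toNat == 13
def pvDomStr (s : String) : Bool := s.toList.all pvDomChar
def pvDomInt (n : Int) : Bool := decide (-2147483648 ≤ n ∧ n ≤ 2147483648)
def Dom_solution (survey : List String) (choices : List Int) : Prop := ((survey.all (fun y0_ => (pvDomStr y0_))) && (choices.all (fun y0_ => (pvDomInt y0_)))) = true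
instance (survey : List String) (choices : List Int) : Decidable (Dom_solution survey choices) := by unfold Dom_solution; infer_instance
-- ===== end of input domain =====

-- B replaces A's single pass over the answers mutating a dict of per-pole [left,right] score lists
-- (with the 1↔3 remap / is_reversed branches / index(max) selection) by four staged passes, one per
-- indicator in output order, each summing a signed per-answer pull and reading the letter off the
-- sign of that sum (objective: alternative — no dict, no mutation; same O(n) cost).

-- ''.join(sorted(s)) — the sorted character key of a survey entry (shared helper, both sides)
def keyOf (s : String) : List Char := PySem.List.sorted s.toList (fun c => c) false

-- ===== PORT A =====
-- the body of A's 'for i in range(len(choices))' loop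
def stepA (ind : PySem.Dict (List Char) (Int × Int)) (s : String) (point : Int) :
    PySem.Dict (List Char) (Int × Int) :=
  let currIndi := keyOf s
  let isReversed := currIndi != s.toList
  if point < 4 then
    let point := if point = 1 then (3 : Int) else if point = 3 then 1 else point
    if isReversed then ind.modify currIndi (0, 0) (fun v => (v.1, v.2 + point))
    else ind.modify currIndi (0, 0) (fun v => (v.1 + point, v.2))
  else if point > 4 then
    let point := point - 4
    if isReversed then ind.modify currIndi (0, 0) (fun v => (v.1 + point, v.2))
    else ind.modify currIndi (0, 0) (fun v => (v.1, v.2 + point))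
  else ind

-- A's answer loop; value.index(max(value)) on the 2-element list [a, b] is hand-ported:
-- max([a,b]) is the first maximal element, .index finds its first occurrence
def ansA (ind : PySem.Dict (List Char) (Int × Int)) : String :=
  String.mk (ind.items.foldl (fun acc kv =>
    let m := if kv.2.1 ≥ kv.2.2 then kv.2.1 else kv.2.2
    let idx : Int := if kv.2.1 = m then 0 else 1
    acc ++ [PySem.List.pyGetD kv.1 idx ' ']) [])

def solution (survey : List String) (choices : List Int) : String :=
  let indicate : PySem.Dict (List Char) (Int × Int) :=
    PySem.Dict.ofList [(['R','T'], (0,0)), (['C','F'], (0,0)), (['J','M'], (0,0)), (['A','N'], (0,0))]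
  let indicate :=
    (PySem.List.pyRange 0 (PySem.List.len choices) 1).foldl
      (fun ind i => stepA ind (PySem.List.pyGetD survey i "") (PySem.List.pyGetD choices i 0))
      indicate
  ansA indicate

-- ===== PORT B =====
-- B's helper _pull(q, c): the signed pull of one answer toward the first letter of its sorted key
def leanW (q : String) (c : Int) : Int :=
  let w : Int := if c < 4 then (if c = 1 then 3 else if c = 3 then 1 else c)
                 else if c > 4 then 4 - c else 0
  if q.toList = keyOf q then w else -w

-- B's 'sum(_pull(q, c) for q, c in zip(...) if ''.join(sorted(q)) == key)'
def scoreB (key : List Char) (L : List (String × Int)) : Int :=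
  (L.filter (fun p => keyOf p.1 == key)).foldl (fun acc p => acc + leanW p.1 p.2) 0

-- B's 'for key in (RT, CF, JM, AN): answer += key[0] if balance >= 0 else key[1]'
def solution_alt (survey : List String) (choices : List Int) : String :=
  String.mk (([['R','T'],['C','F'],['J','M'],['A','N']] : List (List Char)).foldl
    (fun acc key =>
      let balance := scoreB key (survey.zip choices)
      acc ++ [if balance ≥ 0 then PySem.List.pyGetD key 0 ' ' else PySem.List.pyGetD key 1 ' ']) [])

-- ===== PRECONDITION & SPEC =====
def pvKeys : List (List Char) := [['R','T'], ['C','F'], ['J','M'], ['A','N']]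

-- Pre_ excludes exactly the inputs on which A raises: an index i < len(choices) with no survey[i]
-- (IndexError), or a processed answer whose choice is ≠ 4 while sorted(survey[i]) is not one of the
-- four indicator keys (dict .get returns None, then TypeError on None[…]).
def Pre_solution (survey : List String) (choices : List Int) : Prop :=
  choices.length ≤ survey.length ∧
  ∀ p ∈ survey.zip choices, p.2 = 4 ∨ keyOf p.1 ∈ pvKeys

instance (survey : List String) (choices : List Int) : Decidable (Pre_solution survey choices) := by
  unfold Pre_solution; infer_instance

def pvWitness_solution : List String × List Int := (["AN", "TR"], [2, 5])

def Spec_solution (survey : List String) (choices : List Int) (out : String) : Prop := out = solution_alt survey choices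
instance (survey : List String) (choices : List Int) (out : String) : Decidable (Spec_solution survey choices out) := by unfold Spec_solution; infer_instance

-- ===== CLAIM (what is proved, stated in full; the proofs are below) =====
def Claim_equal_solution : Prop := ∀ (survey : List String) (choices : List Int), Dom_solution survey choices → Pre_solution survey choices → Spec_solution survey choices (solution survey choices)

-- ===== LEMMAS AND PROOFS =====

def mkA (a b c d e f g h : Int) : PySem.Dict (List Char) (Int × Int) :=
  PySem.Dict.mk [(['R','T'], (a,b)), (['C','F'], (c,d)), (['J','M'], (e,f)), (['A','N'], (g,h))]

def pick (key : List Char) (v : Int) : Char :=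
  if v ≥ 0 then PySem.List.pyGetD key 0 ' ' else PySem.List.pyGetD key 1 ' '

lemma ofListA : (PySem.Dict.ofList
    [(['R','T'], ((0:Int),(0:Int))), (['C','F'], (0,0)), (['J','M'], (0,0)), (['A','N'], (0,0))])
    = mkA 0 0 0 0 0 0 0 0 := by
  apply PySem.Dict.ext; decide

lemma fold_range_zip {α : Type} (g : α → String → Int → α) :
    ∀ (c : List Int) (s : List String), c.length ≤ s.length → ∀ (init : α),
      (PySem.List.pyRange 0 (c.length) 1).foldl
        (fun acc i => g acc (PySem.List.pyGetD s i "") (PySem.List.pyGetD c i 0)) init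
      = (s.zip c).foldl (fun acc p => g acc p.1 p.2) init := by
  intro c
  induction c with
  | nil =>
    intro s _ init
    simp [PySem.List.pyRange_one_eq_nil]
  | cons y c' ih =>
    intro s hlen init
    cases s with
    | nil => simp at hlen
    | cons x s' =>
      rw [PySem.List.pyRange_one]
      simp only [sub_zero, Int.toNat_natCast, List.foldl_map, zero_add]
      simp only [List.length_cons]
      rw [List.range_succ_eq_map]
      simp only [List.foldl_cons, List.foldl_map]
      have h0 : (PySem.List.pyGetD (x :: s') ((0:Nat) : Int) "") = x := by
        simp [PySem.List.pyGetD_natCast]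
      have h0' : (PySem.List.pyGetD (y :: c') ((0:Nat) : Int) 0) = y := by
        simp [PySem.List.pyGetD_natCast]
      have hstep : (fun (acc : α) (k : Nat) =>
            g acc (PySem.List.pyGetD (x :: s') ((k+1 : Nat) : Int) "")
                  (PySem.List.pyGetD (y :: c') ((k+1 : Nat) : Int) 0))
          = (fun (acc : α) (k : Nat) =>
            g acc (PySem.List.pyGetD s' ((k : Nat) : Int) "")
                  (PySem.List.pyGetD c' ((k : Nat) : Int) 0)) := by
        funext acc k
        simp [PySem.List.pyGetD, PySem.List.pyGet?_cons_succ]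
      have hz : (x :: s').zip (y :: c') = (x, y) :: s'.zip c' := rfl
      rw [hz, List.foldl_cons, h0, h0', hstep]
      have := ih s' (by simpa using hlen) (g init x y)
      rw [PySem.List.pyRange_one] at this
      simp only [sub_zero, Int.toNat_natCast, List.foldl_map, zero_add] at this
      exact this

lemma ans_base (a b c d e f g h : Int) :
    ansA (mkA a b c d e f g h)
    = String.mk [pick ['R','T'] (a-b), pick ['C','F'] (c-d), pick ['J','M'] (e-f), pick ['A','N'] (g-h)] := by
  have key : ∀ (u v : Int) (k : List Char),
      PySem.List.pyGetD k (if u = (if u ≥ v then u else v) then 0 else 1) ' ' = pick k (u - v) := by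
    intro u v k
    unfold pick
    by_cases h : u ≥ v
    · rw [if_pos h, if_pos rfl, if_pos (by omega)]
    · rw [if_neg h, if_neg (by omega), if_neg (by omega)]
  simp only [ansA, mkA, List.foldl, key, List.nil_append, List.cons_append]

lemma leanW_four (q : String) : leanW q 4 = 0 := by
  simp [leanW]

lemma scoreB_cons (key : List Char) (q : String × Int) (L : List (String × Int)) :
    scoreB key (q :: L) = (if keyOf q.1 = key then leanW q.1 q.2 else 0) + scoreB key L := by
  simp only [scoreB, List.filter_cons]
  by_cases h : keyOf q.1 = key
  · simp [h, PySem.List.foldl_add, add_comm]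
  · simp [h]

lemma step_pair (s : String) (p : Int) (hk : keyOf s ∈ pvKeys) (a b c d e f g h : Int) :
    ∃ a' b' c' d' e' f' g' h' : Int,
      stepA (mkA a b c d e f g h) s p = mkA a' b' c' d' e' f' g' h' ∧
      a' - b' = a - b + (if keyOf s = ['R','T'] then leanW s p else 0) ∧
      c' - d' = c - d + (if keyOf s = ['C','F'] then leanW s p else 0) ∧
      e' - f' = e - f + (if keyOf s = ['J','M'] then leanW s p else 0) ∧
      g' - h' = g - h + (if keyOf s = ['A','N'] then leanW s p else 0) := by
  simp only [pvKeys, List.mem_cons, List.not_mem_nil, or_false] at hk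
  rcases hk with hk | hk | hk | hk
  · by_cases hq : s.toList = ['R','T']
    · rcases lt_trichotomy p 4 with h4 | h4 | h4
      · exact ⟨a + (if p = 1 then (3:Int) else if p = 3 then 1 else p), b, c, d, e, f, g, h,
          by (simp [stepA, hk, hq, h4]; try rfl),
          by simp [leanW, hk, hq, h4]; ring, by simp [hk], by simp [hk], by simp [hk]⟩
      · exact ⟨a, b, c, d, e, f, g, h, by simp [stepA, h4],
          by simp [leanW, hk, hq, h4], by simp [hk], by simp [hk], by simp [hk]⟩
      · exact ⟨a, b + (p - 4), c, d, e, f, g, h,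
          by (simp [stepA, hk, hq, show ¬ p < 4 by omega, h4]; try rfl),
          by simp [leanW, hk, hq, show ¬ p < 4 by omega, h4]; ring,
          by simp [hk], by simp [hk], by simp [hk]⟩
    · have hq2 : ['R','T'] ≠ s.toList := Ne.symm hq
      rcases lt_trichotomy p 4 with h4 | h4 | h4
      · exact ⟨a, b + (if p = 1 then (3:Int) else if p = 3 then 1 else p), c, d, e, f, g, h,
          by (simp [stepA, hk, hq2, h4]; try rfl),
          by simp [leanW, hk, hq, h4]; ring, by simp [hk], by simp [hk], by simp [hk]⟩
      · exact ⟨a, b, c, d, e, f, g, h, by simp [stepA, h4],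
          by simp [leanW, hk, hq, h4], by simp [hk], by simp [hk], by simp [hk]⟩
      · exact ⟨a + (p - 4), b, c, d, e, f, g, h,
          by (simp [stepA, hk, hq2, show ¬ p < 4 by omega, h4]; try rfl),
          by simp [leanW, hk, hq, show ¬ p < 4 by omega, h4]; ring,
          by simp [hk], by simp [hk], by simp [hk]⟩
  · by_cases hq : s.toList = ['C','F']
    · rcases lt_trichotomy p 4 with h4 | h4 | h4
      · exact ⟨a, b, c + (if p = 1 then (3:Int) else if p = 3 then 1 else p), d, e, f, g, h,
          by (simp [stepA, hk, hq, h4]; try rfl),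
          by simp [hk], by simp [leanW, hk, hq, h4]; ring, by simp [hk], by simp [hk]⟩
      · exact ⟨a, b, c, d, e, f, g, h, by simp [stepA, h4],
          by simp [hk], by simp [leanW, hk, hq, h4], by simp [hk], by simp [hk]⟩
      · exact ⟨a, b, c, d + (p - 4), e, f, g, h,
          by (simp [stepA, hk, hq, show ¬ p < 4 by omega, h4]; try rfl),
          by simp [hk], by simp [leanW, hk, hq, show ¬ p < 4 by omega, h4]; ring,
          by simp [hk], by simp [hk]⟩
    · have hq2 : ['C','F'] ≠ s.toList := Ne.symm hq
      rcases lt_trichotomy p 4 with h4 | h4 | h4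
      · exact ⟨a, b, c, d + (if p = 1 then (3:Int) else if p = 3 then 1 else p), e, f, g, h,
          by (simp [stepA, hk, hq2, h4]; try rfl),
          by simp [hk], by simp [leanW, hk, hq, h4]; ring, by simp [hk], by simp [hk]⟩
      · exact ⟨a, b, c, d, e, f, g, h, by simp [stepA, h4],
          by simp [hk], by simp [leanW, hk, hq, h4], by simp [hk], by simp [hk]⟩
      · exact ⟨a, b, c + (p - 4), d, e, f, g, h,
          by (simp [stepA, hk, hq2, show ¬ p < 4 by omega, h4]; try rfl),
          by simp [hk], by simp [leanW, hk, hq, show ¬ p < 4 by omega, h4]; ring,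
          by simp [hk], by simp [hk]⟩
  · by_cases hq : s.toList = ['J','M']
    · rcases lt_trichotomy p 4 with h4 | h4 | h4
      · exact ⟨a, b, c, d, e + (if p = 1 then (3:Int) else if p = 3 then 1 else p), f, g, h,
          by (simp [stepA, hk, hq, h4]; try rfl),
          by simp [hk], by simp [hk], by simp [leanW, hk, hq, h4]; ring, by simp [hk]⟩
      · exact ⟨a, b, c, d, e, f, g, h, by simp [stepA, h4],
          by simp [hk], by simp [hk], by simp [leanW, hk, hq, h4], by simp [hk]⟩
      · exact ⟨a, b, c, d, e, f + (p - 4), g, h,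
          by (simp [stepA, hk, hq, show ¬ p < 4 by omega, h4]; try rfl),
          by simp [hk], by simp [hk], by simp [leanW, hk, hq, show ¬ p < 4 by omega, h4]; ring,
          by simp [hk]⟩
    · have hq2 : ['J','M'] ≠ s.toList := Ne.symm hq
      rcases lt_trichotomy p 4 with h4 | h4 | h4
      · exact ⟨a, b, c, d, e, f + (if p = 1 then (3:Int) else if p = 3 then 1 else p), g, h,
          by (simp [stepA, hk, hq2, h4]; try rfl),
          by simp [hk], by simp [hk], by simp [leanW, hk, hq, h4]; ring, by simp [hk]⟩
      · exact ⟨a, b, c, d, e, f, g, h, by simp [stepA, h4],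
          by simp [hk], by simp [hk], by simp [leanW, hk, hq, h4], by simp [hk]⟩
      · exact ⟨a, b, c, d, e + (p - 4), f, g, h,
          by (simp [stepA, hk, hq2, show ¬ p < 4 by omega, h4]; try rfl),
          by simp [hk], by simp [hk], by simp [leanW, hk, hq, show ¬ p < 4 by omega, h4]; ring,
          by simp [hk]⟩
  · by_cases hq : s.toList = ['A','N']
    · rcases lt_trichotomy p 4 with h4 | h4 | h4
      · exact ⟨a, b, c, d, e, f, g + (if p = 1 then (3:Int) else if p = 3 then 1 else p), h,
          by (simp [stepA, hk, hq, h4]; try rfl),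
          by simp [hk], by simp [hk], by simp [hk], by simp [leanW, hk, hq, h4]; ring⟩
      · exact ⟨a, b, c, d, e, f, g, h, by simp [stepA, h4],
          by simp [hk], by simp [hk], by simp [hk], by simp [leanW, hk, hq, h4]⟩
      · exact ⟨a, b, c, d, e, f, g, h + (p - 4),
          by (simp [stepA, hk, hq, show ¬ p < 4 by omega, h4]; try rfl),
          by simp [hk], by simp [hk], by simp [hk],
          by simp [leanW, hk, hq, show ¬ p < 4 by omega, h4]; ring⟩
    · have hq2 : ['A','N'] ≠ s.toList := Ne.symm hq
      rcases lt_trichotomy p 4 with h4 | h4 | h4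
      · exact ⟨a, b, c, d, e, f, g, h + (if p = 1 then (3:Int) else if p = 3 then 1 else p),
          by (simp [stepA, hk, hq2, h4]; try rfl),
          by simp [hk], by simp [hk], by simp [hk], by simp [leanW, hk, hq, h4]; ring⟩
      · exact ⟨a, b, c, d, e, f, g, h, by simp [stepA, h4],
          by simp [hk], by simp [hk], by simp [hk], by simp [leanW, hk, hq, h4]⟩
      · exact ⟨a, b, c, d, e, f, g + (p - 4), h,
          by (simp [stepA, hk, hq2, show ¬ p < 4 by omega, h4]; try rfl),
          by simp [hk], by simp [hk], by simp [hk],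
          by simp [leanW, hk, hq, show ¬ p < 4 by omega, h4]; ring⟩

lemma main_inv (L : List (String × Int))
    (hok : ∀ p ∈ L, p.2 = 4 ∨ keyOf p.1 ∈ pvKeys) :
    ∀ (a b c d e f g h : Int),
      ansA (L.foldl (fun ind p => stepA ind p.1 p.2) (mkA a b c d e f g h))
      = String.mk [pick ['R','T'] (a - b + scoreB ['R','T'] L),
                   pick ['C','F'] (c - d + scoreB ['C','F'] L),
                   pick ['J','M'] (e - f + scoreB ['J','M'] L),
                   pick ['A','N'] (g - h + scoreB ['A','N'] L)] := by
  induction L with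
  | nil =>
    intro a b c d e f g h
    simp only [List.foldl_nil, scoreB, List.filter_nil, add_zero]
    exact ans_base a b c d e f g h
  | cons q L ih =>
    intro a b c d e f g h
    have hokL : ∀ p ∈ L, p.2 = 4 ∨ keyOf p.1 ∈ pvKeys := fun p hp => hok p (List.mem_cons_of_mem _ hp)
    simp only [List.foldl_cons]
    rcases hok q List.mem_cons_self with h4 | hkey
    · rw [show stepA (mkA a b c d e f g h) q.1 q.2 = mkA a b c d e f g h by simp [stepA, h4]]
      rw [ih hokL a b c d e f g h]
      simp [scoreB_cons, h4, leanW_four]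
    · obtain ⟨a', b', c', d', e', f', g', h', hA, e1, e2, e3, e4⟩ :=
        step_pair q.1 q.2 hkey a b c d e f g h
      rw [hA, ih hokL a' b' c' d' e' f' g' h']
      rw [show a' - b' + scoreB ['R','T'] L = a - b + scoreB ['R','T'] (q :: L) by
            rw [scoreB_cons, e1]; ring,
          show c' - d' + scoreB ['C','F'] L = c - d + scoreB ['C','F'] (q :: L) by
            rw [scoreB_cons, e2]; ring,
          show e' - f' + scoreB ['J','M'] L = e - f + scoreB ['J','M'] (q :: L) by
            rw [scoreB_cons, e3]; ring,
          show g' - h' + scoreB ['A','N'] L = g - h + scoreB ['A','N'] (q :: L) by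
            rw [scoreB_cons, e4]; ring]

-- ===== VERDICT (by name: the statement is the Claim_ definition above) =====
theorem solution_spec : Claim_equal_solution := by
  intro survey choices _ hpre
  obtain ⟨hlen, hok⟩ := hpre
  unfold Spec_solution solution solution_alt
  rw [ofListA]
  simp only [PySem.List.len_eq]
  rw [show ((choices.length : Int)) = ((choices.length : Nat) : Int) from rfl]
  rw [fold_range_zip stepA choices survey hlen]
  rw [main_inv (survey.zip choices) hok 0 0 0 0 0 0 0 0]
  simp [pick, List.foldl]
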